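-- pv_equiv track=rewrite | github.com/virajz/advanced-rag-lecture | main.py | naive_vector_search
-- ===== SOURCE A (Python) =====
-- from typing import List, Dict, Tuple
--
-- DOCS = [
--     {
--         "id": "ssl_formats",
--         "text": "SSL certificates are commonly encoded in PEM or DER formats. PEM files often contain a certificate chain.",
--     },
--     {
--         "id": "dev_setup_ssl_mention",
--         "text": "For local development, you can run the app on http://localhost:3000. Some teams mention SSL in dev, but it is not required.",
--     },
--     {
--         "id": "rotation_policy",
--         "text": "Certificate rotation policy: rotate every 90 days. Automate renewal and monitor expiry dates.",
--     },
--     {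
--         "id": "prod_ssl_steps",
--         "text": "Production SSL setup steps: 1) Put fullchain.pem and privkey.pem in /etc/myapp/tls/. "
--         "2) Set TLS_CERT_PATH and TLS_KEY_PATH. 3) Set HTTPS_PORT=443. 4) Restart service.",
--     },
--     {
--         "id": "container_port_note",
--         "text": "For containerized deployments behind a reverse proxy, expose 8443 internally and terminate TLS at the proxy. "
--         "Do not bind 443 in the container.",
--     },
--     {
--         "id": "compliance_req",
--         "text": "Compliance requires TLS 1.2+ and disallows weak ciphers. All production endpoints must support modern cipher suites.",
--     },
--     {
--         "id": "infra_constraint",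
--         "text": "Infrastructure constraint: only the reverse proxy can bind privileged ports (e.g., 443). "
--         "Application containers must use high ports.",
--     },
-- ]
--
-- def naive_vector_search(query: str, top_k: int = 3) -> List[Dict]:
--     # Keyword overlap score. This is intentionally brittle to illustrate failure modes.
--     q = set(tokenize(query))
--     scored: List[Tuple[int, Dict]] = []
--     for d in DOCS:
--         t = set(tokenize(d["text"]))
--         score = len(q.intersection(t))
--         scored.append((score, d))
--     scored.sort(key=lambda x: x[0], reverse=True)
--     return [d for score, d in scored[:top_k]]
--
-- def tokenize(text: str) -> List[str]:
--     return [w.strip("?,.!:;()[]{}\"'").lower() for w in text.split() if w.strip("?,.!:;()[]{}\"'")]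
-- ===== SOURCE B (Python) =====
-- from typing import List, Dict, Tuple
--
-- DOCS = [
--     {
--         "id": "ssl_formats",
--         "text": "SSL certificates are commonly encoded in PEM or DER formats. PEM files often contain a certificate chain.",
--     },
--     {
--         "id": "dev_setup_ssl_mention",
--         "text": "For local development, you can run the app on http://localhost:3000. Some teams mention SSL in dev, but it is not required.",
--     },
--     {
--         "id": "rotation_policy",
--         "text": "Certificate rotation policy: rotate every 90 days. Automate renewal and monitor expiry dates.",
--     },
--     {
--         "id": "prod_ssl_steps",
--         "text": "Production SSL setup steps: 1) Put fullchain.pem and privkey.pem in /etc/myapp/tls/. "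
--         "2) Set TLS_CERT_PATH and TLS_KEY_PATH. 3) Set HTTPS_PORT=443. 4) Restart service.",
--     },
--     {
--         "id": "container_port_note",
--         "text": "For containerized deployments behind a reverse proxy, expose 8443 internally and terminate TLS at the proxy. "
--         "Do not bind 443 in the container.",
--     },
--     {
--         "id": "compliance_req",
--         "text": "Compliance requires TLS 1.2+ and disallows weak ciphers. All production endpoints must support modern cipher suites.",
--     },
--     {
--         "id": "infra_constraint",
--         "text": "Infrastructure constraint: only the reverse proxy can bind privileged ports (e.g., 443). "
--         "Application containers must use high ports.",
--     },
-- ]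
--
-- def tokenize(text: str) -> List[str]:
--     return [w.strip("?,.!:;()[]{}\"'").lower() for w in text.split() if w.strip("?,.!:;()[]{}\"'")]
--
-- def naive_vector_search(query: str, top_k: int = 3) -> List[Dict]:
--     # Inverted index built once over DOCS; per-token posting lists drive the scoring,
--     # so a doc's score never requires re-scanning its text against the query.
--     index: Dict[str, List[int]] = {}
--     for i, d in enumerate(DOCS):
--         for w in set(tokenize(d["text"])):
--             index.setdefault(w, []).append(i)
--     hits: Dict[int, int] = {}
--     for w in set(tokenize(query)):
--         for i in index.get(w, []):
--             hits[i] = hits.get(i, 0) + 1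
--     scored = [(hits.get(i, 0), d) for i, d in enumerate(DOCS)]
--     scored.sort(key=lambda x: x[0], reverse=True)
--     return [d for score, d in scored[:top_k]]
-- ===== Notes on version B (the rewrite author's own statement) =====
-- stated objective: alternative
-- what changed: Replaces A's per-document set-intersection scoring by an inverted index built once over DOCS (token -> posting list of doc indices) that drives a hit-counter dict keyed by doc index; the stable sort by score (reverse) and the [:top_k] slice are kept identical.
import Mathlib
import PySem

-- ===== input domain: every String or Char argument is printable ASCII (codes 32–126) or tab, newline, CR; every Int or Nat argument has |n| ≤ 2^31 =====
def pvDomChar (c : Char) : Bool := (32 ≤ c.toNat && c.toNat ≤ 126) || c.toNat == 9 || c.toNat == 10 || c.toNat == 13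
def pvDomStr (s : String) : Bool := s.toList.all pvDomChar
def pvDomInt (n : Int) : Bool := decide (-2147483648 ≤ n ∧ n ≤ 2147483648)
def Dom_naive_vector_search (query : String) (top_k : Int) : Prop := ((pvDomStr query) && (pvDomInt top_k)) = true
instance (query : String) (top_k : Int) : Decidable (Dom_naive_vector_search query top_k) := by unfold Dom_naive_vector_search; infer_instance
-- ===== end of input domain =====

-- B replaces A's per-document set-intersection scoring by an inverted index (token → posting
-- list of doc indices) driving a hit counter; sort and slice are unchanged (objective: alternative).

-- shared module constant DOCS (list of dicts → association lists)
def DOCS : List (List (String × String)) :=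
 [
  [("id", "ssl_formats"), ("text", "SSL certificates are commonly encoded in PEM or DER formats. PEM files often contain a certificate chain.")],
  [("id", "dev_setup_ssl_mention"), ("text", "For local development, you can run the app on http://localhost:3000. Some teams mention SSL in dev, but it is not required.")],
  [("id", "rotation_policy"), ("text", "Certificate rotation policy: rotate every 90 days. Automate renewal and monitor expiry dates.")],
  [("id", "prod_ssl_steps"), ("text", "Production SSL setup steps: 1) Put fullchain.pem and privkey.pem in /etc/myapp/tls/. 2) Set TLS_CERT_PATH and TLS_KEY_PATH. 3) Set HTTPS_PORT=443. 4) Restart service.")],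
  [("id", "container_port_note"), ("text", "For containerized deployments behind a reverse proxy, expose 8443 internally and terminate TLS at the proxy. Do not bind 443 in the container.")],
  [("id", "compliance_req"), ("text", "Compliance requires TLS 1.2+ and disallows weak ciphers. All production endpoints must support modern cipher suites.")],
  [("id", "infra_constraint"), ("text", "Infrastructure constraint: only the reverse proxy can bind privileged ports (e.g., 443). Application containers must use high ports.")]
 ]

-- w.strip("?,.!:;()[]{}\"'")
def stripPunct (w : String) : String := PySem.Str.stripChars w "?,.!:;()[]{}\"'"

-- tokenize (shared helper of both Pythons)
def tokenize (text : String) : List String :=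
  ((PySem.Str.split₀ text).filter (fun w => stripPunct w != "")).map (fun w => PySem.Str.lower (stripPunct w))

-- d["text"]: exact here because every DOCS entry carries a "text" key, so the lookup never raises
def getText (d : List (String × String)) : String := (PySem.Dict.mk d).getD "text" ""

-- set(tokenize(d["text"])) (computed in A's loop body and in B's index-building loop body)
def docTokens (d : List (String × String)) : PySem.Set String := PySem.Set.ofList (tokenize (getText d))

-- ===== PORT A =====
def naive_vector_search (query : String) (top_k : Int) : List (List (String × String)) :=
  let q : PySem.Set String := PySem.Set.ofList (tokenize query)
  let scored : List (Int × List (String × String)) :=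
    DOCS.foldl (fun scored d =>
      let t := docTokens d
      let score : Int := PySem.Set.len (PySem.Set.inter q t)
      scored ++ [(score, d)]) []
  (PySem.List.slice (PySem.List.sorted scored (fun x => x.1) true) none (some top_k)).map (fun x => x.2)

-- ===== PORT B =====
def naive_vector_search_alt (query : String) (top_k : Int) : List (List (String × String)) :=
  let index : PySem.Dict String (List Int) :=
    (PySem.List.enumerate DOCS).foldl
      (fun index p => (docTokens p.2).foldl
        (fun index w => index.insert w (index.getD w [] ++ [p.1])) index)
      PySem.Dict.empty
  let hits : PySem.Dict Int Int :=
    (PySem.Set.ofList (tokenize query)).foldl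
      (fun hits w => (index.getD w []).foldl (fun hits i => hits.insert i (hits.getD i 0 + 1)) hits)
      PySem.Dict.empty
  let scored : List (Int × List (String × String)) :=
    (PySem.List.enumerate DOCS).map (fun p => (hits.getD p.1 0, p.2))
  (PySem.List.slice (PySem.List.sorted scored (fun x => x.1) true) none (some top_k)).map (fun x => x.2)

-- ===== PRECONDITION & SPEC =====
def Spec_naive_vector_search (query : String) (top_k : Int) (out : List (List (String × String))) : Prop := out = naive_vector_search_alt query top_k
instance (query : String) (top_k : Int) (out : List (List (String × String))) : Decidable (Spec_naive_vector_search query top_k out) := by unfold Spec_naive_vector_search; infer_instance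

-- ===== CLAIM (what is proved, stated in full; the proofs are below) =====
def Claim_equal_naive_vector_search : Prop := ∀ (query : String) (top_k : Int), Dom_naive_vector_search query top_k → Spec_naive_vector_search query top_k (naive_vector_search query top_k)

-- ===== LEMMAS AND PROOFS =====

def pvDoc (n : Nat) : List (String × String) := DOCS.getD n []

lemma pv_enum_DOCS : PySem.List.enumerate DOCS =
    [(0, pvDoc 0), (1, pvDoc 1), (2, pvDoc 2), (3, pvDoc 3), (4, pvDoc 4), (5, pvDoc 5), (6, pvDoc 6)] := by
  rfl

lemma pv_DOCS_expand : DOCS = [pvDoc 0, pvDoc 1, pvDoc 2, pvDoc 3, pvDoc 4, pvDoc 5, pvDoc 6] := by rfl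

-- one pass of B's index-building inner loop ('for w in set(...): index.setdefault(w, []).append(i)')
lemma pv_build_inner (i : Int) (ts : List String) (hnd : ts.Nodup)
    (idx : PySem.Dict String (List Int)) (w : String) :
    (ts.foldl (fun idx u => idx.insert u (idx.getD u [] ++ [i])) idx).getD w []
      = idx.getD w [] ++ (if w ∈ ts then [i] else []) := by
  induction ts generalizing idx with
  | nil => simp
  | cons u ts ih =>
    rcases List.nodup_cons.mp hnd with ⟨hu, hnd'⟩
    rw [List.foldl_cons, ih hnd', PySem.Dict.getD_insert]
    by_cases hw : w = u
    · subst hw; simp [hu]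
    · simp [hw, List.mem_cons]

-- B's whole index-building loop: the posting list of w lists, in order, the indices of the docs containing w
lemma pv_build_outer (L : List (Int × List (String × String)))
    (idx : PySem.Dict String (List Int)) (w : String) :
    (L.foldl (fun idx p => (docTokens p.2).foldl
        (fun idx u => idx.insert u (idx.getD u [] ++ [p.1])) idx) idx).getD w []
      = idx.getD w [] ++ (L.filter (fun p => decide (w ∈ docTokens p.2))).map Prod.fst := by
  induction L generalizing idx with
  | nil => simp
  | cons p L ih =>
    rw [List.foldl_cons, ih,
      pv_build_inner p.1 (docTokens p.2) (by simp [docTokens]) idx w]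
    by_cases h : w ∈ docTokens p.2 <;> simp [h]

lemma pv_count_fst_filter {α : Type} (L : List (Int × α)) (q : Int × α → Bool) (j : Int) :
    ((L.filter q).map Prod.fst).count j = L.countP (fun p => (p.1 == j) && q p) := by
  simp [List.count, List.countP_map, List.countP_filter, Function.comp]

-- B's hit-counting loop, flattened over the posting lists
lemma pv_hits_eq (qs : List String) (index : PySem.Dict String (List Int)) (j : Int) :
    (qs.foldl (fun hits w => (index.getD w []).foldl
        (fun hits i => hits.insert i (hits.getD i 0 + 1)) hits) PySem.Dict.empty).getD j 0
      = ((qs.flatMap (fun w => index.getD w [])).count j : Int) := by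
  rw [← List.foldl_flatMap, PySem.Dict.getD_foldl_insert_add_one]
  simp

-- A's per-document score as a countP over the query token set
lemma pv_lenInter (qs : List String) (T : PySem.Set String) :
    PySem.Set.len (PySem.Set.inter qs T) = ((qs.countP (fun w => decide (w ∈ T))) : Int) := by
  simp [PySem.Set.len, PySem.Set.inter, List.countP_eq_length_filter]

-- A's per-doc score ↔ B's hit count for doc j, given the literal posting characterization at j
lemma pv_component (qs : List String) (j : Int) (d : List (String × String))
    (L : List (Int × List (String × String)))
    (hcnt : ∀ w : String, L.countP
        (fun p => (p.1 == j) && decide (w ∈ docTokens p.2)) = if w ∈ docTokens d then 1 else 0) :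
    PySem.Set.len (PySem.Set.inter qs (docTokens d))
      = ((qs.flatMap (fun w => (L.filter
            (fun p => decide (w ∈ docTokens p.2))).map Prod.fst)).count j : Int) := by
  rw [pv_lenInter, List.count_flatMap]
  have h1 : ∀ w : String,
      (((L.filter (fun p => decide (w ∈ docTokens p.2))).map Prod.fst).count j)
        = if decide (w ∈ docTokens d) then 1 else 0 := by
    intro w
    rw [pv_count_fst_filter, hcnt w]
    by_cases h : w ∈ docTokens d <;> simp [h]
  have h2 : (qs.map (List.count j ∘ fun w => (L.filter
        (fun p => decide (w ∈ docTokens p.2))).map Prod.fst)).sum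
      = qs.countP (fun w => decide (w ∈ docTokens d)) := by
    simp only [Function.comp_def]
    rw [List.map_congr_left (fun w _ => h1 w)]
    exact PySem.List.sum_map_ite_one_zero_nat _ qs
  rw [h2]

-- the two 'scored' lists agree, component by component
lemma pv_scored_eq (query : String) :
    (List.foldl (fun scored d => scored ++ [(((PySem.Set.ofList (tokenize query)).inter (docTokens d)).len, d)])
        [] DOCS)
    = (List.map
        (fun p =>
          ((List.foldl
              (fun hits w =>
                List.foldl (fun hits i => hits.insert i (hits.getD i 0 + 1)) hits
                  ((List.foldl
                      (fun index p =>
                        List.foldl (fun index w => index.insert w (index.getD w [] ++ [p.1])) index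
                          (docTokens p.2))
                      PySem.Dict.empty (PySem.List.enumerate DOCS)).getD
                    w []))
              PySem.Dict.empty (PySem.Set.ofList (tokenize query))).getD
            p.1 0,
          p.2))
        (PySem.List.enumerate DOCS)) := by
  rw [PySem.List.foldl_append_singleton_eq_map]
  simp only [pv_hits_eq]
  simp only [pv_build_outer, PySem.Dict.getD_empty, List.nil_append]
  rw [pv_enum_DOCS, pv_DOCS_expand]
  simp only [List.map_cons, List.map_nil, List.cons.injEq, Prod.mk.injEq, and_true]
  refine ⟨?_, ?_, ?_, ?_, ?_, ?_, ?_⟩ <;>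
    · refine pv_component _ _ _ _ (fun w => ?_)
      simp [List.countP_cons]

-- ===== VERDICT (by name: the statement is the Claim_ definition above) =====
theorem naive_vector_search_spec : Claim_equal_naive_vector_search := by
  intro query top_k _
  unfold Spec_naive_vector_search
  simp only [naive_vector_search, naive_vector_search_alt]
  rw [pv_scored_eq]
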